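-- pv_equiv track=rewrite | github.com/ltyiz07/jump_2 | kakao_test/test_2.py | pick_n
-- ===== SOURCE A (Python) =====
-- def pick_n(lst="", n=0):
--     if n == 1:
--         l = []
--         for i in lst:
--             l.append(i)
--         return l
--
--     else:
--         temp_lst = []
--         for i in range(len(lst)):
--             x = lst[i]
--             xs = lst[i + 1:]
--             for r in pick_n(xs, n - 1):
--                 temp_lst.append(x + r)
--         return temp_lst
-- ===== SOURCE B (Python) =====
-- from itertools import combinations
-- from functools import reduce
-- from operator import add
--
--
-- def pick_n(lst="", n=0):
--     if n < 1 or n > len(lst):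
--         return []
--     return [reduce(add, combo) for combo in combinations(lst, n)]
-- ===== Notes on version B (the rewrite author's own statement) =====
-- stated objective: idiomatic
-- what changed: Replaces A's hand-written index loop with slicing and per-prefix recursion by a guard for n<1 plus itertools.combinations, folding each tuple with reduce(operator.add); the include/skip combination recursion replaces A's index-and-slice scan.
import Mathlib
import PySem

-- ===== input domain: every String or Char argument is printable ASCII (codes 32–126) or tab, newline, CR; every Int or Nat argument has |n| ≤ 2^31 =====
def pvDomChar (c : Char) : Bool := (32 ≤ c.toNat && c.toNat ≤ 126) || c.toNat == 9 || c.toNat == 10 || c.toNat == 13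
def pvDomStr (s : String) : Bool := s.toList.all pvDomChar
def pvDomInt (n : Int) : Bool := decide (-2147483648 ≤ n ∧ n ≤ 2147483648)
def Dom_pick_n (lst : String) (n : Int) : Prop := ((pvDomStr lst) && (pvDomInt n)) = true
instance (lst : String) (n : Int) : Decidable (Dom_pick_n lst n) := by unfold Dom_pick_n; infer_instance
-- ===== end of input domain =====

-- B replaces A's index-and-slice recursion by a guard plus itertools.combinations with a
-- reduce(add) fold over each tuple (objective: idiomatic, a different decomposition).

-- ===== PORT A =====
-- A iterates the string; iterating a Python string yields 1-char strings, and lst[i+1:] with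
-- i+1 ≥ 0 is exactly List.drop (i+1); lst[i] with i ∈ range(len) is in range, so getD is exact.
def pickARec (cs : List Char) (n : Int) : List String :=
  if n = 1 then
    -- l = []; for i in lst: l.append(i); return l
    cs.foldl (fun l i => l ++ [String.singleton i]) []
  else
    -- temp_lst = []; for i in range(len(lst)): x = lst[i]; xs = lst[i+1:];
    --   for r in pick_n(xs, n-1): temp_lst.append(x + r)
    (List.range cs.length).attach.foldl
      (fun temp i =>
        temp ++ (pickARec (cs.drop (i.1 + 1)) (n - 1)).map
          (fun r => String.singleton (cs.getD i.1 ' ') ++ r)) []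
termination_by cs.length
decreasing_by
  have := List.mem_range.mp i.2
  simp [List.length_drop]
  omega

def pick_n (lst : String) (n : Int) : List String := pickARec lst.toList n

-- ===== PORT B =====
-- itertools.combinations(lst, n): include-first / skip recursion, emitting the tuples in
-- index order exactly as itertools does.
def combosB : List Char → Nat → List (List Char)
  | _, 0 => [[]]
  | [], _ + 1 => []
  | c :: cs, k + 1 => (combosB cs k).map (c :: ·) ++ combosB cs (k + 1)

-- functools.reduce(operator.add, combo): first element bare, then left-fold '+' (push, since
-- every later element is a single character; the tuples are nonempty when n ≥ 1).
def reduceAdd (t : List Char) : String :=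
  match t with
  | [] => ""
  | c :: rest => rest.foldl String.push (String.singleton c)

def pick_n_alt (lst : String) (n : Int) : List String :=
  if n < 1 ∨ n > (lst.toList.length : Int) then []
  else (combosB lst.toList n.toNat).map reduceAdd

-- ===== PRECONDITION & SPEC =====
def Spec_pick_n (lst : String) (n : Int) (out : List String) : Prop := out = pick_n_alt lst n
instance (lst : String) (n : Int) (out : List String) : Decidable (Spec_pick_n lst n out) := by unfold Spec_pick_n; infer_instance

-- ===== CLAIM (what is proved, stated in full; the proofs are below) =====
def Claim_equal_pick_n : Prop := ∀ (lst : String) (n : Int), Dom_pick_n lst n → Spec_pick_n lst n (pick_n lst n)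

-- ===== LEMMAS AND PROOFS =====

theorem singleton_eq_ofList (c : Char) : String.singleton c = String.ofList [c] := by
  apply String.toList_injective; simp

theorem push_ofList' (s : List Char) (c : Char) :
    (String.ofList s).push c = String.ofList (s ++ [c]) := by
  apply String.toList_injective; simp

theorem singleton_append_ofList (c : Char) (t : List Char) :
    String.singleton c ++ String.ofList t = String.ofList (c :: t) := by
  apply String.toList_injective; simp

theorem foldl_push_eq (t : List Char) (s : List Char) :
    t.foldl String.push (String.ofList s) = String.ofList (s ++ t) := by
  induction t generalizing s with
  | nil => simp
  | cons c r ih => simpa [push_ofList'] using ih (s ++ [c])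

theorem reduceAdd_eq (t : List Char) : reduceAdd t = String.ofList t := by
  cases t with
  | nil => simp [reduceAdd]
  | cons c r => simpa [reduceAdd, singleton_eq_ofList] using foldl_push_eq r [c]

theorem map_singleton_eq (cs : List Char) :
    cs.map String.singleton = (combosB cs 1).map String.ofList := by
  induction cs with
  | nil => rfl
  | cons c t ih => simp [combosB, singleton_eq_ofList, ih]

-- A's else-branch loop written as a flatMap over the index range
theorem pickARec_else (cs : List Char) (n : Int) (hn : n ≠ 1) :
    pickARec cs n =
      (List.range cs.length).flatMap
        (fun i => (pickARec (cs.drop (i + 1)) (n - 1)).map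
          (fun r => String.singleton (cs.getD i ' ') ++ r)) := by
  rw [pickARec, if_neg hn, ← List.foldl_map (f := Subtype.val)
      (g := fun temp i => temp ++ (pickARec (cs.drop (i + 1)) (n - 1)).map
          (fun r => String.singleton (cs.getD i ' ') ++ r)),
    List.attach_map_subtype_val]
  simpa using PySem.List.foldl_append_eq_flatMap
    (fun i => (pickARec (cs.drop (i + 1)) (n - 1)).map
      (fun r => String.singleton (cs.getD i ' ') ++ r)) (List.range cs.length) []

theorem pickARec_nonpos (cs : List Char) (n : Int) (hn : n ≤ 0) :
    pickARec cs n = [] := by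
  induction hlen : cs.length using Nat.strong_induction_on generalizing cs n with
  | _ L ih =>
    subst hlen
    rw [pickARec_else cs n (by omega)]
    apply List.flatMap_eq_nil_iff.mpr
    intro i hi
    have hi' := List.mem_range.mp hi
    have hlt : (cs.drop (i + 1)).length < cs.length := by
      simp [List.length_drop]; omega
    rw [ih _ hlt _ (n - 1) (by omega) rfl]
    simp

theorem pickARec_eq_combos (cs : List Char) (n : Int) (hn : 1 ≤ n) :
    pickARec cs n = (combosB cs n.toNat).map String.ofList := by
  induction hlen : cs.length using Nat.strong_induction_on generalizing cs n with
  | _ L ih =>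
    subst hlen
    rcases eq_or_lt_of_le hn with h1 | h2
    · -- n = 1
      rw [← h1, pickARec, if_pos rfl,
        PySem.List.foldl_append_singleton_eq_map, List.nil_append, Int.toNat_one]
      exact map_singleton_eq cs
    · -- n ≥ 2
      cases cs with
      | nil =>
        rw [pickARec_else [] n (by omega)]
        have hk : n.toNat = n.toNat - 1 + 1 := by omega
        rw [hk]
        rfl
      | cons c t =>
        rw [pickARec_else (c :: t) n (by omega)]
        have hsplit : List.range (c :: t).length = 0 :: (List.range t.length).map (· + 1) := by
          simp [List.range_succ_eq_map]
        rw [hsplit, List.flatMap_cons, List.flatMap_map]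
        have htail :
            (List.range t.length).flatMap
              (fun i => (pickARec ((c :: t).drop (i + 1 + 1)) (n - 1)).map
                  (fun r => String.singleton ((c :: t).getD (i + 1) ' ') ++ r)) =
            (List.range t.length).flatMap
              (fun i => (pickARec (t.drop (i + 1)) (n - 1)).map
                  (fun r => String.singleton (t.getD i ' ') ++ r)) := by
          apply List.flatMap_congr
          intro i _
          rfl
        rw [htail, ← pickARec_else t n (by omega)]
        have hrec1 : pickARec t (n - 1) = (combosB t (n - 1).toNat).map String.ofList :=
          ih t.length (by simp) t (n - 1) (by omega) rfl
        have hrec2 : pickARec t n = (combosB t n.toNat).map String.ofList :=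
          ih t.length (by simp) t n (by omega) rfl
        have hk : n.toNat = (n - 1).toNat + 1 := by omega
        rw [hrec2, hk]
        simp only [combosB, List.map_append, List.map_map]
        congr 1
        simp only [List.drop_succ_cons, List.drop_zero, List.getD_cons_zero, hrec1,
          List.map_map]
        apply List.map_congr_left
        intro u _
        simp [Function.comp, singleton_append_ofList]

theorem combosB_eq_nil (cs : List Char) (k : Nat) (h : cs.length < k) :
    combosB cs k = [] := by
  induction cs generalizing k with
  | nil => cases k with
    | zero => omega
    | succ m => rfl
  | cons c t ih =>
    cases k with
    | zero => omega
    | succ m =>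
      simp at h
      simp [combosB, ih m (by omega), ih (m + 1) (by omega)]

-- ===== VERDICT (by name: the statement is the Claim_ definition above) =====
theorem pick_n_spec : Claim_equal_pick_n := by
  intro lst n _
  show pick_n lst n = pick_n_alt lst n
  unfold pick_n pick_n_alt
  by_cases h : n < 1 ∨ n > (lst.toList.length : Int)
  · rw [if_pos h]
    rcases h with h | h
    · exact pickARec_nonpos _ _ (by omega)
    · rw [pickARec_eq_combos _ _ (by omega), combosB_eq_nil _ _ (by omega)]
      rfl
  · rw [if_neg h]
    push_neg at h
    rw [pickARec_eq_combos _ _ (by omega)]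
    apply List.map_congr_left
    intro t _
    exact (reduceAdd_eq t).symm
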